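-- pv_equiv track=rewrite | github.com/TheGiver44/genogrand-bot | src/changelog_context.py | _extract_latest_section
-- ===== SOURCE A (Python) =====
-- def _extract_latest_section(text: str) -> str:
--     lines = text.splitlines()
--     header_indices = [i for i, line in enumerate(lines) if line.strip().startswith("## ")]
--     if not header_indices:
--         return ""
--     start = header_indices[0]
--     end = header_indices[1] if len(header_indices) > 1 else len(lines)
--     return "\n".join(lines[start:end]).strip()
-- ===== SOURCE B (Python) =====
-- def _extract_latest_section(text: str) -> str:
--     # State machine over the lines: collect the first section's lines directly
--     # while scanning, instead of locating header indices and slicing.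
--     section = None
--     for line in text.splitlines():
--         if line.strip().startswith("## "):
--             if section is None:
--                 section = [line]
--             else:
--                 break
--         elif section is not None:
--             section.append(line)
--     if section is None:
--         return ""
--     return "\n".join(section).strip()
-- ===== Notes on version B (the rewrite author's own statement) =====
-- stated objective: alternative
-- what changed: A locates header line indices and slices the line list; B is a state machine that accumulates the section's lines directly during one scan, never computing indices or slicing.
import Mathlib
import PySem

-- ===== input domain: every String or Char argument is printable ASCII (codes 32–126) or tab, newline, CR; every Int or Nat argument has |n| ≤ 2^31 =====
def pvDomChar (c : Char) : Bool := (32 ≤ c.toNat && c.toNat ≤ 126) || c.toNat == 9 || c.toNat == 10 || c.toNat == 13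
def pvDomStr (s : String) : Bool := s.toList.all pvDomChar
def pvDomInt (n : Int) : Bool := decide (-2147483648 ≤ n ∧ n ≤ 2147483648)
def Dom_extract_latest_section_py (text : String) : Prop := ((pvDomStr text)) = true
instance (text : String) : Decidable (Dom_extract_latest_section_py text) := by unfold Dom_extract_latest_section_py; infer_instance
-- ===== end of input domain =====

-- B replaces A's find-header-indices-then-slice plan with a state machine that
-- accumulates the first section's lines directly during one scan; same result.

-- the header test 'line.strip().startswith("## ")' shared by both Pythons
def pvHdrP (l : String) : Bool := PySem.Str.startswith (PySem.Str.strip l) "## "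

-- ===== PORT A =====
def extract_latest_section_py (text : String) : String :=
  let lines := PySem.Str.splitlines text
  let header_indices :=
    (PySem.List.enumerate lines 0).foldl
      (fun acc p => if pvHdrP p.2 then acc ++ [p.1] else acc) []
  match header_indices with
  | [] => ""
  | start :: rest =>
    let e : Int := match rest with | e :: _ => e | [] => (lines.length : Int)
    PySem.Str.strip (PySem.Str.join "\n" (PySem.List.slice lines (some start) (some e)))

-- ===== PORT B =====
-- the for-loop of Source B: state = the section collected so far (None before the first header)
def pvBLoop (ls : List String) (sec? : Option (List String)) : Option (List String) :=
  match ls with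
  | [] => sec?
  | l :: rest =>
    if pvHdrP l then
      match sec? with
      | none => pvBLoop rest (some [l])
      | some s => some s            -- break
    else
      match sec? with
      | none => pvBLoop rest none
      | some s => pvBLoop rest (some (s ++ [l]))

def extract_latest_section_py_alt (text : String) : String :=
  match pvBLoop (PySem.Str.splitlines text) none with
  | none => ""
  | some sec => PySem.Str.strip (PySem.Str.join "\n" sec)

-- ===== PRECONDITION & SPEC =====
def Spec_extract_latest_section_py (text : String) (out : String) : Prop := out = extract_latest_section_py_alt text
instance (text : String) (out : String) : Decidable (Spec_extract_latest_section_py text out) := by unfold Spec_extract_latest_section_py; infer_instance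

-- ===== CLAIM (what is proved, stated in full; the proofs are below) =====
def Claim_equal_extract_latest_section_py : Prop := ∀ (text : String), Dom_extract_latest_section_py text → Spec_extract_latest_section_py text (extract_latest_section_py text)

-- ===== LEMMAS AND PROOFS =====

-- common specification: the first header line together with the following non-header lines
def pvSec : List String → Option (List String)
  | [] => none
  | l :: rest => if pvHdrP l then some (l :: rest.takeWhile (fun x => !pvHdrP x)) else pvSec rest

-- header positions, Nat-indexed from m
def pvHdrN : List String → Nat → List Nat
  | [], _ => []
  | l :: rest, m => if pvHdrP l then m :: pvHdrN rest (m + 1) else pvHdrN rest (m + 1)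

theorem pvBLoop_some (ls : List String) (acc : List String) :
    pvBLoop ls (some acc) = some (acc ++ ls.takeWhile (fun x => !pvHdrP x)) := by
  induction ls generalizing acc with
  | nil => simp [pvBLoop]
  | cons l rest ih =>
    by_cases h : pvHdrP l
    · simp [pvBLoop, h]
    · simp [pvBLoop, h, ih]

theorem pvBLoop_none (ls : List String) : pvBLoop ls none = pvSec ls := by
  induction ls with
  | nil => rfl
  | cons l rest ih =>
    by_cases h : pvHdrP l
    · simp [pvBLoop, pvSec, h, pvBLoop_some]
    · simp [pvBLoop, pvSec, h, ih]

theorem pvHdrN_enum (ls : List String) (m : Nat) :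
    (PySem.List.enumerate ls (m : Int)).foldl
      (fun acc p => if pvHdrP p.2 then acc ++ [p.1] else acc) []
      = (pvHdrN ls m).map (fun n : Nat => (n : Int)) := by
  have key : ∀ (ls : List String) (m : Nat),
      ((PySem.List.enumerate ls (m : Int)).filter (fun p => pvHdrP p.2)).map (fun p => p.1)
        = (pvHdrN ls m).map (fun n : Nat => (n : Int)) := by
    intro ls
    induction ls with
    | nil => intro m; simp [PySem.List.enumerate_nil, pvHdrN]
    | cons l rest ih =>
      intro m
      rw [PySem.List.enumerate_cons]
      by_cases h : pvHdrP l
      · have := ih (m + 1)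
        push_cast at this ⊢
        simp [h, pvHdrN, List.filter_cons, this]
      · have := ih (m + 1)
        push_cast at this ⊢
        simp [h, pvHdrN, List.filter_cons, this]
  calc _ = ((PySem.List.enumerate ls (m : Int)).filter (fun p => pvHdrP p.2)).map (·.1) := by
        simpa using PySem.List.foldl_append_if
          (l := PySem.List.enumerate ls (m : Int))
          (fun p : Int × String => pvHdrP p.2) (fun p : Int × String => p.1) (acc := [])
    _ = _ := key ls m

theorem pvHdrN_nil_iff (ls : List String) (m : Nat) :
    pvHdrN ls m = [] ↔ ∀ l ∈ ls, pvHdrP l = false := by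
  induction ls generalizing m with
  | nil => simp [pvHdrN]
  | cons l rest ih =>
    by_cases h : pvHdrP l
    · simp [pvHdrN, h]
    · simp [pvHdrN, h, ih (m + 1)]

theorem takeWhile_of_all_false (ls : List String) (h : ∀ l ∈ ls, pvHdrP l = false) :
    ls.takeWhile (fun x => !pvHdrP x) = ls := by
  induction ls with
  | nil => rfl
  | cons l rest ih =>
    have h1 := h l (by simp)
    simp [List.takeWhile_cons, h1, ih (fun x hx => h x (by simp [hx]))]

theorem pvHdrN_cons_decomp (ls : List String) (m : Nat) (s : Nat) (rest : List Nat)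
    (h : pvHdrN ls m = s :: rest) :
    ∃ pre l post, ls = pre ++ l :: post ∧ (∀ x ∈ pre, pvHdrP x = false) ∧ pvHdrP l = true ∧
      s = m + pre.length ∧ rest = pvHdrN post (s + 1) := by
  induction ls generalizing m with
  | nil => simp [pvHdrN] at h
  | cons l tl ih =>
    by_cases hl : pvHdrP l
    · refine ⟨[], l, tl, by simp, by simp, hl, ?_, ?_⟩
      · have : m = s := by simpa [pvHdrN, hl] using congrArg (List.head? ·) h
        simp [this]
      · simp [pvHdrN, hl] at h
        simp [← h.1, h.2]
    · simp only [pvHdrN, hl] at h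
      obtain ⟨pre, l', post, h1, h2, h3, h4, h5⟩ := ih (m + 1) h
      refine ⟨l :: pre, l', post, by simp [h1], ?_, h3, by simp; omega, h5⟩
      intro x hx
      rcases List.mem_cons.mp hx with hx | hx
      · subst hx; simpa using hl
      · exact h2 x hx

theorem pvSec_decomp (pre : List String) (l : String) (post : List String)
    (hpre : ∀ x ∈ pre, pvHdrP x = false) (hl : pvHdrP l = true) :
    pvSec (pre ++ l :: post) = some (l :: post.takeWhile (fun x => !pvHdrP x)) := by
  induction pre with
  | nil => simp [pvSec, hl]
  | cons p tl ih =>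
    have h1 := hpre p (by simp)
    simp only [List.cons_append, pvSec, h1, Bool.false_eq_true, if_false]
    exact ih (fun x hx => hpre x (by simp [hx]))

theorem pvSec_none (ls : List String) (h : ∀ l ∈ ls, pvHdrP l = false) : pvSec ls = none := by
  induction ls with
  | nil => rfl
  | cons l rest ih =>
    simp [pvSec, h l (by simp), ih (fun x hx => h x (by simp [hx]))]

theorem takeWhile_split (pre : List String) (l : String) (post : List String)
    (hpre : ∀ x ∈ pre, pvHdrP x = false) (hl : pvHdrP l = true) :
    (pre ++ l :: post).takeWhile (fun x => !pvHdrP x) = pre := by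
  induction pre with
  | nil => simp [List.takeWhile_cons, hl]
  | cons p tl ih =>
    have h1 := hpre p (by simp)
    simp [List.takeWhile_cons, h1, ih (fun x hx => hpre x (by simp [hx]))]

-- ===== VERDICT (by name: the statement is the Claim_ definition above) =====
theorem extract_latest_section_py_spec : Claim_equal_extract_latest_section_py := by
  intro text _
  show extract_latest_section_py text = extract_latest_section_py_alt text
  simp only [extract_latest_section_py, extract_latest_section_py_alt]
  rw [pvBLoop_none]
  set lines := PySem.Str.splitlines text with hlines
  rw [show (0 : Int) = ((0 : Nat) : Int) by norm_num, pvHdrN_enum]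
  rcases hH : pvHdrN lines 0 with _ | ⟨s, rest⟩
  · -- no headers: both return ""
    rw [pvSec_none lines ((pvHdrN_nil_iff lines 0).mp hH)]
    rfl
  · obtain ⟨pre, l, post, hsplit, hpre, hl, hs, hrest⟩ := pvHdrN_cons_decomp lines 0 s rest hH
    have hs' : s = pre.length := by omega
    have hdrop : lines.drop s = l :: post := by
      rw [hsplit, hs', List.drop_append_of_le_length (le_refl _)]
      simp
    rw [hsplit, pvSec_decomp pre l post hpre hl, ← hsplit]
    rcases rest with _ | ⟨t, rest2⟩
    · -- no second header: section runs to end of lines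
      have hpost : ∀ x ∈ post, pvHdrP x = false :=
        (pvHdrN_nil_iff post (s + 1)).mp hrest.symm
      rw [takeWhile_of_all_false post hpost]
      simp only [List.map_cons, List.map_nil]
      show PySem.Str.strip (PySem.Str.join "\n"
          (PySem.List.slice lines (some (s : Int)) (some (lines.length : Int)))) = _
      rw [PySem.List.slice_natCast, hdrop]
      have hlen : lines.length = pre.length + (post.length + 1) := by
        rw [hsplit]; simp
      rw [List.take_of_length_le (by simp; omega)]
    · -- second header at t: section is l :: pre2
      obtain ⟨pre2, l2, post2, hsplit2, hpre2, hl2, ht, -⟩ :=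
        pvHdrN_cons_decomp post (s + 1) t rest2 hrest.symm
      rw [show post.takeWhile (fun x => !pvHdrP x) = pre2 by
        rw [hsplit2]; exact takeWhile_split pre2 l2 post2 hpre2 hl2]
      simp only [List.map_cons]
      show PySem.Str.strip (PySem.Str.join "\n"
          (PySem.List.slice lines (some (s : Int)) (some (t : Int)))) = _
      rw [PySem.List.slice_natCast, hdrop]
      have hts : t - s = pre2.length + 1 := by omega
      rw [hts, List.take_succ_cons, hsplit2, List.take_append_of_le_length (le_refl _),
        List.take_length]
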